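-- pv_equiv track=rewrite | github.com/kingkaushalagarwal/100daysofcoding | dynamic programming/distinct_subsequence.py | bruteForceFind
-- ===== SOURCE A (Python) =====
-- def bruteForceFind(A,i,l,d):
--     if i==len(A):
--         value=''.join(l)
--         if  len(value)!=0  and value not in d:
--             d[value] =1
--             return 1
--         else:
--             return 0
--     l.append(A[i])
--     a = bruteForceFind(A,i+1,l,d)
--     l.pop()
--     b = bruteForceFind(A,i+1,l,d)
--     return a+b
-- ===== SOURCE B (Python) =====
-- def bruteForceFind(A, i, l, d):
--     # Builds the set of distinct candidate strings iteratively (one set-union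
--     # per character of the suffix), then counts the non-empty ones not in d.
--     # Return value only: l and d are not mutated.
--     prefix = ''.join(l)
--     cand = {prefix}
--     for ch in A[i:]:
--         cand |= {t + ch for t in cand}
--     return sum(1 for v in cand if v != '' and v not in d)
-- ===== Notes on version B (the rewrite author's own statement) =====
-- stated objective: alternative
-- what changed: A enumerates all 2^n include/exclude choices by recursion, joining the accumulator at each leaf and deduplicating through a dict it threads along; B builds the set of distinct candidate strings iteratively (duplicates collapsing as it goes) and counts the non-empty ones not already in d in one pass, without mutating l or d; Pre_ restricts i to the natural index range 0..len(A), excluding negative i on which A's traversal wraps around via Python negative indexing and revisits the whole string.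
-- outside the precondition, e.g. on bruteForceFind('ab', -1, [], {}): A returns 6, B returns 1
import Mathlib
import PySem

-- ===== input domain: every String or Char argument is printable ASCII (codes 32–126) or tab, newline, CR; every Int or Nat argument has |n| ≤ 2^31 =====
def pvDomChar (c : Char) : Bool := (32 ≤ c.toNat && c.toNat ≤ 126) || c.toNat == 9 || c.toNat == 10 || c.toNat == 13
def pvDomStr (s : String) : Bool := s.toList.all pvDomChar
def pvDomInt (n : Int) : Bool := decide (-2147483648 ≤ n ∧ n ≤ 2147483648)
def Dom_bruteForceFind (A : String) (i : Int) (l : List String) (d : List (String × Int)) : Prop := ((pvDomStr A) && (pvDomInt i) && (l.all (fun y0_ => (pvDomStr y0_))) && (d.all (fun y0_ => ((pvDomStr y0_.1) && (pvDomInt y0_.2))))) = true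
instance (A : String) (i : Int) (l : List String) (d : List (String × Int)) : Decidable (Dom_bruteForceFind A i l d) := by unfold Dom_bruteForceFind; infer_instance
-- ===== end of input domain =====

-- B replaces A's include/exclude DFS (which threads the memo dict through the recursion) by an
-- iterative construction of the SET of distinct candidate strings followed by one counting pass;
-- the equivalence proved is about the RETURN value only (A also inserts the new values into d
-- in place, and appends/pops on l; B mutates neither argument).

-- ===== PORT A =====
def bruteGo (A : String) (i : Int) (l : List String) (d : PySem.Dict String Int) :
    Int × PySem.Dict String Int :=
  if i = PySem.Str.len A then
    let value := PySem.Str.join "" l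
    if PySem.Str.len value ≠ 0 ∧ d.contains value = false then (1, d.insert value 1)
    else (0, d)
  else
    match h : PySem.Str.pyGet? A i with
    | none => (0, d)  -- Python raises IndexError here (i out of range); excluded by Pre_bruteForceFind
    | some c =>
      let r1 := bruteGo A (i + 1) (l ++ [String.ofList [c]]) d   -- l.append(A[i]); recurse
      let r2 := bruteGo A (i + 1) l r1.2                          -- l.pop(); recurse on updated d
      (r1.1 + r2.1, r2.2)
termination_by ((A.toList.length : Int) - i).toNat
decreasing_by
all_goals
  have hir : PySem.Raise.InRange A.toList.length i := by
    by_contra hn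
    rw [← PySem.List.pyGet?_eq_none_iff A.toList i] at hn
    simp [PySem.Str.pyGet?, hn] at h
  rcases hir with ⟨h1, h2⟩
  omega

def bruteForceFind (A : String) (i : Int) (l : List String) (d : List (String × Int)) : Int :=
  (bruteGo A i l (PySem.Dict.mk d)).1

-- ===== PORT B =====
def bruteForceFind_alt (A : String) (i : Int) (l : List String) (d : List (String × Int)) : Int :=
  -- cand = {''.join(l)}; for ch in A[i:]: cand |= {t + ch for t in cand};
  -- then sum(1 for v in cand if v != '' and v not in d)
  ((((PySem.List.slice A.toList (some i) none).foldl
      (fun S ch => PySem.Set.update S (S.map (fun t => t ++ String.ofList [ch])))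
      (PySem.Set.ofList [PySem.Str.join "" l])).countP
      (fun v => v != "" && !((PySem.Dict.mk d).contains v)) : Nat) : Int)

-- ===== PRECONDITION & SPEC =====
-- Pre_ restricts i to the natural index range 0 ≤ i ≤ len(A): above len(A) the Python A raises
-- IndexError, and for negative i A's traversal wraps around via Python negative indexing and
-- revisits the whole string — outside the function's natural domain (suffix index), so excluded.
def Pre_bruteForceFind (A : String) (i : Int) (l : List String) (d : List (String × Int)) : Prop :=
  0 ≤ i ∧ i ≤ PySem.Str.len A
instance (A : String) (i : Int) (l : List String) (d : List (String × Int)) : Decidable (Pre_bruteForceFind A i l d) := by unfold Pre_bruteForceFind; infer_instance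
def pvWitness_bruteForceFind : String × Int × List String × (List (String × Int)) :=
  ("aba", 1, ["x"], [("xa", 1)])
def Spec_bruteForceFind (A : String) (i : Int) (l : List String) (d : List (String × Int)) (out : Int) : Prop := out = bruteForceFind_alt A i l d
instance (A : String) (i : Int) (l : List String) (d : List (String × Int)) (out : Int) : Decidable (Spec_bruteForceFind A i l d out) := by unfold Spec_bruteForceFind; infer_instance

-- ===== CLAIM (what is proved, stated in full; the proofs are below) =====
def Claim_equal_bruteForceFind : Prop := ∀ (A : String) (i : Int) (l : List String) (d : List (String × Int)), Dom_bruteForceFind A i l d → Pre_bruteForceFind A i l d → Spec_bruteForceFind A i l d (bruteForceFind A i l d)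

-- ===== LEMMAS AND PROOFS =====

-- the keys of a dict, as a finite set
def keysF (d : PySem.Dict String Int) : Finset String := (d.items.map Prod.fst).toFinset

-- the set of strings p ++ t, t a subsequence of cs (A's candidate set from prefix p)
def cands (p : String) : List Char → Finset String
  | [] => {p}
  | c :: cs => cands (p ++ String.ofList [c]) cs ∪ cands p cs

theorem contains_iff_keysF (d : PySem.Dict String Int) (v : String) :
    d.contains v = true ↔ v ∈ keysF d := by
  simp only [PySem.Dict.contains, List.any_eq_true, beq_iff_eq, keysF, List.mem_toFinset,
    List.mem_map]

theorem keysF_insert (d : PySem.Dict String Int) (v : String) (w : Int) :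
    keysF (d.insert v w) = insert v (keysF d) := by
  have hmem : ∀ x, x ∈ keysF (d.insert v w) ↔ x = v ∨ x ∈ keysF d := by
    intro x
    unfold PySem.Dict.insert
    split
    · next hc =>
      rw [contains_iff_keysF] at hc
      simp only [keysF, List.mem_toFinset, List.mem_map] at *
      constructor
      · rintro ⟨q, ⟨p, hp, rfl⟩, he⟩
        by_cases hv : p.1 = v
        · left; rw [if_pos (by simpa using hv)] at he; exact he.symm
        · right; rw [if_neg (by simpa using hv)] at he; exact ⟨p, hp, he⟩
      · rintro (rfl | ⟨p, hp, he⟩)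
        · rcases hc with ⟨p, hp, he⟩
          exact ⟨(x, w), ⟨p, hp, by rw [if_pos (by simpa using he)]⟩, rfl⟩
        · by_cases hv : p.1 = v
          · exact ⟨(v, w), ⟨p, hp, by rw [if_pos (by simpa using hv)]⟩, by simp [← he, hv]⟩
          · exact ⟨p, ⟨p, hp, by rw [if_neg (by simpa using hv)]⟩, he⟩
    · simp only [keysF, List.mem_toFinset, List.map_append, List.mem_append, List.mem_map]
      constructor
      · rintro (⟨p, hp, he⟩ | h)
        · right; exact ⟨p, hp, he⟩
        · left; simpa [eq_comm] using h
      · rintro (rfl | ⟨p, hp, he⟩)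
        · right; simp
        · left; exact ⟨p, hp, he⟩
  ext x
  rw [hmem, Finset.mem_insert]

theorem drop_step (A : String) (i : Int) (h0 : 0 ≤ i) (h2 : i < (A.toList.length : Int)) :
    ∃ c, PySem.Str.pyGet? A i = some c ∧
      A.toList.drop i.toNat = c :: A.toList.drop (i + 1).toNat := by
  have hlt : i.toNat < A.toList.length := by omega
  refine ⟨A.toList[i.toNat], ?_, ?_⟩
  · simpa [PySem.Str.pyGet?] using PySem.List.pyGet?_eq_some_getElem (xs := A.toList) h0 h2
  · rw [List.drop_eq_getElem_cons hlt]
    congr 2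
    omega

theorem joinNil_flatten : ∀ (xs : List (List Char)), PySem.Chars.join [] xs = xs.flatten := by
  intro xs
  induction xs with
  | nil => simp [PySem.Chars.join_nil]
  | cons a t ih =>
    cases t with
    | nil => simp [PySem.Chars.join_singleton]
    | cons b r => simp [PySem.Chars.join_cons_cons, ih]

theorem join_snoc (l : List String) (x : String) :
    PySem.Str.join "" (l ++ [x]) = PySem.Str.join "" l ++ x := by
  have h1 := PySem.Str.toList_join "" (l ++ [x])
  have h2 := PySem.Str.toList_join "" l
  have : (PySem.Str.join "" (l ++ [x])).toList = (PySem.Str.join "" l ++ x).toList := by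
    rw [String.toList_append, h1, h2]
    simp [joinNil_flatten]
  calc PySem.Str.join "" (l ++ [x]) = String.ofList (PySem.Str.join "" (l ++ [x])).toList := by
        rw [String.ofList_toList]
    _ = String.ofList (PySem.Str.join "" l ++ x).toList := by rw [this]
    _ = PySem.Str.join "" l ++ x := by rw [String.ofList_toList]

-- main invariant of A's recursion
theorem go_spec (A : String) : ∀ (m : Nat) (i : Int),
    (((A.toList.length : Int) - i).toNat = m) →
    0 ≤ i → i ≤ (A.toList.length : Int) →
    ∀ (l : List String) (d : PySem.Dict String Int),
    (bruteGo A i l d).1 =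
      (((cands (PySem.Str.join "" l) (A.toList.drop i.toNat)) \ insert "" (keysF d)).card : Int) ∧
    keysF (bruteGo A i l d).2 =
      keysF d ∪ ((cands (PySem.Str.join "" l) (A.toList.drop i.toNat)) \ {""}) := by
  intro m
  induction m with
  | zero =>
    intro i hm h1 h2 l d
    have hi : i = (A.toList.length : Int) := by omega
    subst hi
    have hlen : ((A.toList.length : Int)) = PySem.Str.len A := by simp [PySem.Str.len]
    rw [bruteGo, if_pos hlen]
    rw [List.drop_of_length_le (by omega)]
    set p := PySem.Str.join "" l with hp
    dsimp only
    split
    · next h =>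
      have hpne : p ≠ "" := by
        intro e
        rw [e] at h
        simp [PySem.Str.len] at h
      have hnk : p ∉ keysF d := by
        rw [← contains_iff_keysF]
        simp [h.2]
      constructor
      · have e1 : ({p} : Finset String) \ insert "" (keysF d) = {p} := by
          ext x
          simp only [Finset.mem_sdiff, Finset.mem_singleton, Finset.mem_insert]
          constructor
          · exact fun h => h.1
          · rintro rfl; exact ⟨rfl, by push_neg; exact ⟨hpne, hnk⟩⟩
        simp [cands, e1]
      · rw [keysF_insert]
        ext x
        simp only [cands, Finset.mem_insert, Finset.mem_union, Finset.mem_sdiff,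
          Finset.mem_singleton]
        constructor
        · rintro (rfl | hx)
          · exact Or.inr ⟨rfl, hpne⟩
          · exact Or.inl hx
        · rintro (hx | ⟨rfl, _⟩)
          · exact Or.inr hx
          · exact Or.inl rfl
    · next h =>
      push_neg at h
      have hor : p = "" ∨ p ∈ keysF d := by
        by_cases hpe : p = ""
        · exact Or.inl hpe
        · refine Or.inr ?_
          rw [← contains_iff_keysF]
          have hlp : PySem.Str.len p ≠ 0 := by
            intro e
            apply hpe
            have : p.toList.length = 0 := by
              simpa [PySem.Str.len, PySem.Chars.len] using e
            have : p.toList = [] := List.length_eq_zero_iff.mp this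
            rw [← String.ofList_toList (s := p), this]
          have := h hlp
          simp only [Bool.not_eq_false] at this ⊢
          exact this
      constructor
      · have e1 : ({p} : Finset String) \ insert "" (keysF d) = ∅ := by
          ext x
          simp only [Finset.mem_sdiff, Finset.mem_singleton, Finset.mem_insert,
            Finset.notMem_empty, iff_false]
          rintro ⟨rfl, hx⟩
          exact hx (by tauto)
        simp [cands, e1]
      · have e2 : ({p} : Finset String) \ {""} ⊆ keysF d := by
          intro x hx
          simp only [Finset.mem_sdiff, Finset.mem_singleton] at hx
          rcases hor with hpe | hk
          · rw [hpe] at hx; exact absurd hx.1 hx.2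
          · rw [hx.1]; exact hk
        simp only [cands]
        exact (Finset.union_eq_left.mpr e2).symm
  | succ m ih =>
    intro i hm h1 h2 l d
    have h2' : i < (A.toList.length : Int) := by omega
    have hne : ¬ i = PySem.Str.len A := by
      simp only [PySem.Str.len]
      omega
    obtain ⟨c, hc, hdrop⟩ := drop_step A i h1 h2'
    rw [bruteGo, if_neg hne]
    split
    · next h' =>
      rw [hc] at h'
      exact absurd h' (by simp)
    next c' h' =>
    rw [hc] at h'
    injection h' with hcc
    subst hcc
    dsimp only
    have ih1 := ih (i + 1) (by omega) (by omega) (by omega) (l ++ [String.ofList [c]]) d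
    rw [join_snoc] at ih1
    set d1 := (bruteGo A (i + 1) (l ++ [String.ofList [c]]) d).2 with hd1
    have ih2 := ih (i + 1) (by omega) (by omega) (by omega) l d1
    rw [hdrop]
    set p := PySem.Str.join "" l with hp
    set C1 := cands (p ++ String.ofList [c]) (A.toList.drop (i + 1).toNat) with hC1
    set C2 := cands p (A.toList.drop (i + 1).toNat) with hC2
    set K := keysF d with hK
    have hcands : cands p (c :: A.toList.drop (i + 1).toNat) = C1 ∪ C2 := by
      rw [hC1, hC2]
      simp only [cands]
    rw [hcands]
    have hK1 : keysF d1 = K ∪ (C1 \ {""}) := ih1.2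
    have e1 : insert "" (K ∪ (C1 \ {""})) = insert "" K ∪ C1 := by
      ext x
      simp only [Finset.mem_insert, Finset.mem_union, Finset.mem_sdiff, Finset.mem_singleton]
      by_cases hx : x = "" <;> tauto
    have e2 : (C1 \ insert "" K) ∪ (C2 \ (insert "" K ∪ C1)) = (C1 ∪ C2) \ insert "" K := by
      ext x
      simp only [Finset.mem_union, Finset.mem_sdiff]
      tauto
    have hdisj : Disjoint (C1 \ insert "" K) (C2 \ (insert "" K ∪ C1)) := by
      rw [Finset.disjoint_left]
      intro a ha hb
      simp only [Finset.mem_sdiff, Finset.mem_union] at ha hb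
      tauto
    constructor
    · rw [ih1.1, ih2.1, hK1, e1]
      rw [← e2, Finset.card_union_of_disjoint hdisj]
      push_cast
      ring
    · rw [ih2.2, hK1]
      ext x
      simp only [Finset.mem_union, Finset.mem_sdiff, Finset.mem_singleton]
      tauto

-- B's fold over the characters builds exactly the candidate set
theorem fold_mem (cs : List Char) : ∀ (S : PySem.Set String) (x : String),
    (x ∈ cs.foldl (fun S ch => PySem.Set.update S (S.map (fun t => t ++ String.ofList [ch]))) S
      ↔ ∃ q ∈ S, x ∈ cands q cs) := by
  induction cs with
  | nil =>
    intro S x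
    simp only [List.foldl_nil, cands, Finset.mem_singleton]
    constructor
    · exact fun h => ⟨x, h, rfl⟩
    · rintro ⟨q, hq, rfl⟩; exact hq
  | cons ch cs ih =>
    intro S x
    rw [List.foldl_cons, ih]
    constructor
    · rintro ⟨q, hq, hx⟩
      rw [PySem.Set.mem_update] at hq
      rcases hq with hq | hq
      · exact ⟨q, hq, by simp only [cands, Finset.mem_union]; exact Or.inr hx⟩
      · rcases List.mem_map.mp hq with ⟨t, ht, rfl⟩
        exact ⟨t, ht, by simp only [cands, Finset.mem_union]; exact Or.inl hx⟩
    · rintro ⟨q, hq, hx⟩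
      simp only [cands, Finset.mem_union] at hx
      rcases hx with hx | hx
      · exact ⟨q ++ String.ofList [ch],
          (PySem.Set.mem_update _ _ _).mpr (Or.inr (List.mem_map.mpr ⟨q, hq, rfl⟩)), hx⟩
      · exact ⟨q, (PySem.Set.mem_update _ _ _).mpr (Or.inl hq), hx⟩

theorem fold_nodup (cs : List Char) : ∀ S : PySem.Set String, S.Nodup →
    (cs.foldl (fun S ch => PySem.Set.update S (S.map (fun t => t ++ String.ofList [ch]))) S).Nodup := by
  induction cs with
  | nil => intro S h; exact h
  | cons ch cs ih =>
    intro S h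
    rw [List.foldl_cons]
    exact ih _ (PySem.Set.nodup_update _ _ h)

theorem countP_eq_card (L : List String) (hN : L.Nodup) (C : Finset String)
    (hm : ∀ x, x ∈ L ↔ x ∈ C) (p : String → Bool) :
    L.countP p = (C.filter (fun x => p x = true)).card := by
  have hf : (L.filter p).toFinset = C.filter (fun x => p x = true) := by
    ext x
    simp only [List.mem_toFinset, List.mem_filter, Finset.mem_filter, hm x]
  calc L.countP p = (L.filter p).length := List.countP_eq_length_filter
    _ = (L.filter p).toFinset.card := (List.toFinset_card_of_nodup (hN.filter p)).symm
    _ = (C.filter (fun x => p x = true)).card := by rw [hf]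

-- ===== VERDICT (by name: the statement is the Claim_ definition above) =====
theorem bruteForceFind_spec : Claim_equal_bruteForceFind := by
  unfold Claim_equal_bruteForceFind
  intro A i l d hdom hpre
  obtain ⟨h1, h2'⟩ := hpre
  have h2 : i ≤ (A.toList.length : Int) := by
    simpa [PySem.Str.len, PySem.Chars.len] using h2'
  unfold Spec_bruteForceFind bruteForceFind bruteForceFind_alt
  rw [PySem.List.slice_from A.toList h1]
  have hgo := go_spec A (((A.toList.length : Int) - i).toNat) i rfl h1 h2 l (PySem.Dict.mk d)
  rw [hgo.1]
  set p := PySem.Str.join "" l with hp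
  set C := cands p (A.toList.drop i.toNat) with hC
  set cand := (A.toList.drop i.toNat).foldl
      (fun S ch => PySem.Set.update S (S.map (fun t => t ++ String.ofList [ch])))
      (PySem.Set.ofList [p]) with hcand
  have hmem : ∀ x, x ∈ cand ↔ x ∈ C := by
    intro x
    rw [hcand, fold_mem]
    constructor
    · rintro ⟨q, hq, hx⟩
      have : q = p := by simpa using (PySem.Set.mem_ofList (xs := [p]) (y := q)).mp hq
      rw [this] at hx
      exact hx
    · intro hx
      exact ⟨p, by simp [PySem.Set.mem_ofList], hx⟩
  have hnd : cand.Nodup := fold_nodup _ _ (PySem.Set.nodup_ofList [p])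
  rw [countP_eq_card cand hnd C hmem]
  have hfilter : C.filter
      (fun v => (v != "" && !((PySem.Dict.mk d).contains v)) = true) = C \ insert "" (keysF (PySem.Dict.mk d)) := by
    ext x
    simp only [Finset.mem_filter, Finset.mem_sdiff, Finset.mem_insert, Bool.and_eq_true,
      bne_iff_ne, Bool.not_eq_true']
    rw [show ((PySem.Dict.mk d).contains x = false) ↔ ¬ x ∈ keysF (PySem.Dict.mk d) from by
      rw [← contains_iff_keysF]
      simp only [Bool.not_eq_true]]
    tauto
  rw [hfilter]
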